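-- pv_equiv track=rewrite | github.com/heznpc/z-gap | experiments/src/vocab_internationality.py | _stem_match
-- ===== SOURCE A (Python) =====
-- def _stem_match(tokens_a: set[str], tokens_b: set[str], min_prefix: int = 4) -> int:
--     """Count stem-level matches: tokens sharing a prefix of min_prefix chars.
--
--     "evaluate"/"evalua" share "eval" (4-char prefix) → match.
--     "ascending"/"ascendente" share "asce" (4-char prefix) → match.
--     """
--     matches = 0
--     for a in tokens_a:
--         for b in tokens_b:
--             prefix_len = min(len(a), len(b), min_prefix)
--             if prefix_len >= min_prefix and a[:prefix_len] == b[:prefix_len]: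
--                 matches += 1
--                 break  # each token in a matches at most once
--     return matches
-- ===== SOURCE B (Python) =====
-- def _stem_match(tokens_a, tokens_b, min_prefix=4):
--     """Count stem-level matches by grouping a-tokens into prefix buckets.
--
--     Build a counter of the length-min_prefix prefixes of the a-tokens and a
--     set of the b-token prefixes, then sum the bucket counts whose prefix
--     appears on the b side (one pass over buckets, no per-token scan of B).
--     """
--     groups = {}
--     for a in tokens_a:
--         if len(a) >= min_prefix:
--             p = a[:min_prefix]
--             groups[p] = groups.get(p, 0) + 1
--     b_prefixes = set()
--     for b in tokens_b:
--         if len(b) >= min_prefix: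
--             b_prefixes.add(b[:min_prefix])
--     total = 0
--     for p, c in groups.items():
--         if p in b_prefixes:
--             total += c
--     return total
-- ===== Notes on version B (the rewrite author's own statement) =====
-- stated objective: faster
-- what changed: Replaces the nested per-token scan of tokens_b by indexing both sides: a-tokens are grouped into a dict of prefix buckets and b-prefixes into a set built once, then one pass over the buckets sums the counts whose prefix appears on the b side.
import Mathlib
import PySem

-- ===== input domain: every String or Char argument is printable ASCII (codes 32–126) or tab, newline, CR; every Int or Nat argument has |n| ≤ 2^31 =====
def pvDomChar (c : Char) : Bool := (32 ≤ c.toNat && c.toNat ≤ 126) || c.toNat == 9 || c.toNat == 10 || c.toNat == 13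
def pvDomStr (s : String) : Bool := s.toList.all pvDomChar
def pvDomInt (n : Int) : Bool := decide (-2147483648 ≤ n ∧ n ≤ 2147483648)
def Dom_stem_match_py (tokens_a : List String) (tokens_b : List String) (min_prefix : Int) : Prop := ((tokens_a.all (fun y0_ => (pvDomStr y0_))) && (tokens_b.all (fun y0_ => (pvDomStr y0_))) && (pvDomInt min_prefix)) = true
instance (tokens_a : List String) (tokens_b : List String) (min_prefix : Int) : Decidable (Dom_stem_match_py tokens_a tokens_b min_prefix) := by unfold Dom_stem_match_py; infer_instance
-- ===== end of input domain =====

-- B groups a-tokens into prefix buckets (a counter) and indexes b-prefixes in a set,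
-- replacing A's nested per-token scan of tokens_b; measured objective: faster.


-- ===== PORT A =====
-- for a in tokens_a: for b in tokens_b: … break  — the inner scan-with-break on a pure
-- test is List.any; cnt += 1 when some b cnt.
def stem_match_py (tokens_a : List String) (tokens_b : List String) (min_prefix : Int) : Int :=
  tokens_a.foldl (fun cnt a =>
    if tokens_b.any (fun b =>
        let prefix_len : Int := min (min (a.toList.length : Int) (b.toList.length : Int)) min_prefix
        decide (prefix_len ≥ min_prefix) &&
          decide (PySem.List.slice a.toList none (some prefix_len)
                  = PySem.List.slice b.toList none (some prefix_len)))
    then cnt + 1 else cnt) 0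

-- ===== PORT B =====
def stem_match_py_alt (tokens_a : List String) (tokens_b : List String) (min_prefix : Int) : Int :=
  let groups : PySem.Dict (List Char) Int :=
    tokens_a.foldl (fun d a =>
      if (a.toList.length : Int) ≥ min_prefix then
        let p := PySem.List.slice a.toList none (some min_prefix)
        d.insert p (d.getD p 0 + 1)
      else d) PySem.Dict.empty
  let b_prefixes : PySem.Set (List Char) :=
    tokens_b.foldl (fun s b =>
      if (b.toList.length : Int) ≥ min_prefix then
        PySem.Set.add s (PySem.List.slice b.toList none (some min_prefix))
      else s) PySem.Set.empty
  groups.items.foldl (fun total pc => if pc.1 ∈ b_prefixes then total + pc.2 else total) 0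

-- ===== PRECONDITION & SPEC =====
def Spec_stem_match_py (tokens_a : List String) (tokens_b : List String) (min_prefix : Int) (out : Int) : Prop := out = stem_match_py_alt tokens_a tokens_b min_prefix
instance (tokens_a : List String) (tokens_b : List String) (min_prefix : Int) (out : Int) : Decidable (Spec_stem_match_py tokens_a tokens_b min_prefix out) := by unfold Spec_stem_match_py; infer_instance

-- ===== CLAIM (what is proved, stated in full; the proofs are below) =====
def Claim_equal_stem_match_py : Prop := ∀ (tokens_a : List String) (tokens_b : List String) (min_prefix : Int), Dom_stem_match_py tokens_a tokens_b min_prefix → Spec_stem_match_py tokens_a tokens_b min_prefix (stem_match_py tokens_a tokens_b min_prefix)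

-- ===== LEMMAS AND PROOFS =====

-- the length-min_prefix prefix of a token, and the eligibility test len(tok) >= min_prefix
def pvKey (m : Int) (s : String) : List Char := PySem.List.slice s.toList none (some m)
def pvOk (m : Int) (s : String) : Bool := decide ((s.toList.length : Int) ≥ m)

-- A's inner scan of tokens_b, characterised: a is counted iff it is eligible and some
-- eligible b shares its prefix (prefix_len ≥ min_prefix forces prefix_len = min_prefix)
theorem pv_inner (tb : List String) (m : Int) (a : String) :
    (tb.any (fun b =>
        let prefix_len : Int := min (min (a.toList.length : Int) (b.toList.length : Int)) m
        decide (prefix_len ≥ m) &&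
          decide (PySem.List.slice a.toList none (some prefix_len)
                  = PySem.List.slice b.toList none (some prefix_len))))
      = (pvOk m a && tb.any (fun b => pvOk m b && decide (pvKey m b = pvKey m a))) := by
  by_cases ha : m ≤ (a.toList.length : Int)
  · rw [pvOk, decide_eq_true (by exact ha : (a.toList.length : Int) ≥ m), Bool.true_and]
    apply PySem.List.any_congr_mem
    intro b _
    simp only [ge_iff_le]
    by_cases hb : m ≤ (b.toList.length : Int)
    · have hpl : min (min (a.toList.length : Int) (b.toList.length : Int)) m = m := by omega
      rw [hpl, pvOk, pvKey, pvKey, decide_eq_true hb, decide_eq_true (le_refl m),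
        Bool.true_and, Bool.true_and, Bool.eq_iff_iff, decide_eq_true_eq, decide_eq_true_eq]
      exact eq_comm
    · have hpl : ¬ (m ≤ min (min (a.toList.length : Int) (b.toList.length : Int)) m) := by omega
      rw [pvOk, decide_eq_false hpl, decide_eq_false hb, Bool.false_and, Bool.false_and]
  · rw [pvOk, decide_eq_false (fun h => ha (by exact h)), Bool.false_and, List.any_eq_false]
    intro b _
    simp only [ge_iff_le]
    have hpl : ¬ (m ≤ min (min (a.toList.length : Int) (b.toList.length : Int)) m) := by omega
    rw [decide_eq_false hpl, Bool.false_and]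
    simp

theorem pvA_eq (ta tb : List String) (m : Int) :
    stem_match_py ta tb m
      = (ta.countP (fun a => pvOk m a &&
          tb.any (fun b => pvOk m b && decide (pvKey m b = pvKey m a))) : Int) := by
  unfold stem_match_py
  rw [PySem.List.foldl_if_add_one, zero_add]
  congr 2
  funext a
  rw [pv_inner]

theorem pvSumZero {α : Type} [DecidableEq α] (d : List α) (p : α → Bool) (x : α)
    (hx : x ∉ d) :
    ((d.filter p).map (fun k => if k = x then (1:Int) else 0)).sum = 0 := by
  apply List.sum_eq_zero
  intro y hy
  obtain ⟨k, hk, rfl⟩ := List.mem_map.mp hy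
  have : k ∈ d := (List.mem_filter.mp hk).1
  have hkx : k ≠ x := fun h => hx (h ▸ this)
  simp [hkx]

theorem pvSumSingle {α : Type} [DecidableEq α] (d : List α) (p : α → Bool) (x : α)
    (hd : d.Nodup) (hx : x ∈ d) :
    ((d.filter p).map (fun k => if k = x then (1:Int) else 0)).sum
      = if p x then (1:Int) else 0 := by
  induction d with
  | nil => cases hx
  | cons y t ih =>
    have hyt : y ∉ t := (List.nodup_cons.mp hd).1
    have ht : t.Nodup := (List.nodup_cons.mp hd).2
    by_cases hxy : y = x
    · subst hxy
      by_cases hp : p y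
      · rw [List.filter_cons_of_pos hp, List.map_cons, List.sum_cons, pvSumZero t p y hyt, hp]
        simp
      · rw [List.filter_cons_of_neg (by simp [hp]), pvSumZero t p y hyt]
        simp [hp]
    · have hxt : x ∈ t := by
        cases List.mem_cons.mp hx with
        | inl h => exact absurd h.symm hxy
        | inr h => exact h
      by_cases hp : p y
      · rw [List.filter_cons_of_pos hp, List.map_cons, List.sum_cons, if_neg hxy,
          ih ht hxt, zero_add]
      · rw [List.filter_cons_of_neg (by simp [hp]), ih ht hxt]

-- Σ over the distinct keys (selected by p) of their multiplicities in l = countP p l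
theorem pvSumCount {α : Type} [BEq α] [LawfulBEq α] [DecidableEq α]
    (l d : List α) (p : α → Bool)
    (hd : d.Nodup) (hsub : ∀ x ∈ l, x ∈ d) :
    ((d.filter p).map (fun k => (l.count k : Int))).sum = (l.countP p : Int) := by
  induction l with
  | nil =>
    simp only [List.count_nil, List.countP_nil, Nat.cast_zero]
    apply List.sum_eq_zero
    intro y hy
    obtain ⟨k, _, rfl⟩ := List.mem_map.mp hy
    rfl
  | cons x t ih =>
    have hx : x ∈ d := hsub x List.mem_cons_self
    have hsub' : ∀ y ∈ t, y ∈ d := fun y hy => hsub y (List.mem_cons_of_mem x hy)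
    have hmap : (d.filter p).map (fun k => ((x :: t).count k : Int))
        = (d.filter p).map (fun k => (t.count k : Int) + (if k = x then (1:Int) else 0)) := by
      apply List.map_congr_left
      intro k _
      rw [List.count_cons]
      push_cast
      by_cases hkx : k = x
      · simp [hkx]
      · simp [hkx, Ne.symm hkx]
    rw [hmap, PySem.List.sum_map_add_int, ih hsub', pvSumSingle d p x hd hx,
      List.countP_cons]
    by_cases hp : p x
    · simp [hp]
    · simp [hp]

theorem pvB_eq (ta tb : List String) (m : Int) :
    stem_match_py_alt ta tb m
      = (((ta.filter (pvOk m)).map (pvKey m)).countP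
          (fun k => decide (k ∈ PySem.Set.ofList ((tb.filter (pvOk m)).map (pvKey m)))) : Int) := by
  have hset : (tb.foldl (fun s b =>
      if (b.toList.length : Int) ≥ m then
        PySem.Set.add s (PySem.List.slice b.toList none (some m))
      else s) PySem.Set.empty)
      = PySem.Set.ofList ((tb.filter (pvOk m)).map (pvKey m)) := by
    rw [PySem.List.foldl_ite_eq_foldl_filter]
    exact Eq.symm List.foldl_map
  have hcnt : (ta.foldl (fun d a =>
      if (a.toList.length : Int) ≥ m then
        let p := PySem.List.slice a.toList none (some m)
        d.insert p (d.getD p 0 + 1)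
      else d) PySem.Dict.empty)
      = PySem.Dict.counter ((ta.filter (pvOk m)).map (pvKey m)) := by
    rw [PySem.List.foldl_ite_eq_foldl_filter]
    rw [← PySem.Dict.foldl_insert_getD_add_one_eq_counter]
    exact Eq.symm List.foldl_map
  unfold stem_match_py_alt
  simp only [hset, hcnt, PySem.Dict.items_counter]
  rw [PySem.List.foldl_ite_eq_foldl_filter]
  rw [PySem.List.foldl_add (g := Prod.snd), zero_add]
  rw [List.filter_map, List.map_map]
  have hfun : ((fun pc : List Char × Int => pc.2) ∘
      fun k => (k, (((ta.filter (pvOk m)).map (pvKey m)).count k : Int)))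
      = fun k => ((((ta.filter (pvOk m)).map (pvKey m)).count k : Int)) := rfl
  have hp : ((fun pc : List Char × Int =>
        decide (pc.1 ∈ PySem.Set.ofList ((tb.filter (pvOk m)).map (pvKey m)))) ∘
      fun k => (k, (((ta.filter (pvOk m)).map (pvKey m)).count k : Int)))
      = fun k => decide (k ∈ PySem.Set.ofList ((tb.filter (pvOk m)).map (pvKey m))) := rfl
  rw [hfun, hp]
  exact pvSumCount ((ta.filter (pvOk m)).map (pvKey m))
    (PySem.Set.ofList ((ta.filter (pvOk m)).map (pvKey m)))
    (fun k => decide (k ∈ PySem.Set.ofList ((tb.filter (pvOk m)).map (pvKey m))))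
    (PySem.Set.nodup_ofList _)
    (fun x hx => (PySem.Set.mem_ofList _ _).mpr hx)

-- membership of a prefix in B's b-prefix set = A's inner existence test
theorem pvMem (tb : List String) (m : Int) (k : List Char) :
    (tb.any (fun b => pvOk m b && decide (pvKey m b = k)))
      = decide (k ∈ PySem.Set.ofList ((tb.filter (pvOk m)).map (pvKey m))) := by
  rw [Bool.eq_iff_iff]
  simp only [List.any_eq_true, Bool.and_eq_true, decide_eq_true_eq,
    PySem.Set.mem_ofList, List.mem_map, List.mem_filter]
  constructor
  · rintro ⟨b, hb, hok, hkey⟩; exact ⟨b, ⟨hb, hok⟩, hkey⟩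
  · rintro ⟨b, ⟨hb, hok⟩, hkey⟩; exact ⟨b, hb, hok, hkey⟩

-- ===== VERDICT (by name: the statement is the Claim_ definition above) =====
theorem stem_match_py_spec : Claim_equal_stem_match_py := by
  intro ta tb m _
  unfold Spec_stem_match_py
  rw [pvA_eq, pvB_eq, List.countP_map, List.countP_filter]
  congr 1
  apply List.countP_congr
  intro a _
  simp only [Function.comp_apply, ← pvMem tb m, Bool.and_comm]
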